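-- pv_equiv track=rewrite | github.com/anubhavdubey13/Python | movie_pygame.py | movie_format
-- ===== SOURCE A (Python) =====
-- vowels = ['a','e','i','o','u']
--
-- def movie_format(movie):
--
--     movie = movie.lower()
--
--     guess = []
--     for m in movie:
--         if m in vowels:
--             guess.append(m)
--         elif m == ' ':
--             guess.append('/')
--         else:
--             guess.append('_')
--
--     guess =  ''.join(guess)
--     return guess, movie
-- ===== SOURCE B (Python) =====
-- VOWELS = frozenset('aeiou')
--
-- def movie_format(movie):
--     movie = movie.lower()
--     guess = '/'.join(
--         ''.join(c if c in VOWELS else '_' for c in word)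
--         for word in movie.split(' ')
--     )
--     return guess, movie
-- ===== Notes on version B (the rewrite author's own statement) =====
-- stated objective: alternative
-- what changed: Replaces A's single per-character branching loop with a staged split/mask/join pipeline: lowercase, split on the space separator (empty pieces kept), mask non-vowels to underscores inside each word, and join the pieces with slashes; correct because split-then-join reconstructs the string with every separator replaced.
import Mathlib
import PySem

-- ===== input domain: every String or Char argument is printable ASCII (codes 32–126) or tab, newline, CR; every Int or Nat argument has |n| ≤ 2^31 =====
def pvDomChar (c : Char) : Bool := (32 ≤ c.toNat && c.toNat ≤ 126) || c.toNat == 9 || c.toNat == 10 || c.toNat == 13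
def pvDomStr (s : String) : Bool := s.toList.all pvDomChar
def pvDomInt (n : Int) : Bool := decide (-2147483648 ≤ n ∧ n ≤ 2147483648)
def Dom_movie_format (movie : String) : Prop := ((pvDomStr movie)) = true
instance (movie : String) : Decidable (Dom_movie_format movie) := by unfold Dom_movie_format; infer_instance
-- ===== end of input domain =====

-- B recomputes the guess by splitting on spaces, masking non-vowels in each word, and joining with '/' — a staged split/mask/join decomposition instead of A's per-character branching loop.


-- ===== PORT A =====
def vowels : List Char := ['a', 'e', 'i', 'o', 'u']

def movie_format (movie : String) : String × String :=
  let m := PySem.Str.lower movie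
  let guess : List Char := m.toList.foldl (fun acc c =>
    if c ∈ vowels then acc ++ [c]
    else if c = ' ' then acc ++ ['/']
    else acc ++ ['_']) []
  (String.ofList guess, m)

-- ===== PORT B =====
def bVowels : PySem.Set Char := PySem.Set.ofList ['a', 'e', 'i', 'o', 'u']

-- ''.join(c if c in VOWELS else '_' for c in word)
def maskWord (w : List Char) : List Char :=
  w.map (fun c => if c ∈ bVowels then c else '_')

def movie_format_alt (movie : String) : String × String :=
  let m := PySem.Str.lower movie
  let words := PySem.Chars.splitOn m.toList [' ']
  (String.ofList (PySem.Chars.join ['/'] (words.map maskWord)), m)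

-- ===== PRECONDITION & SPEC =====
def Spec_movie_format (movie : String) (out : String × String) : Prop := out = movie_format_alt movie
instance (movie : String) (out : String × String) : Decidable (Spec_movie_format movie out) := by unfold Spec_movie_format; infer_instance

-- ===== CLAIM (what is proved, stated in full; the proofs are below) =====
def Claim_equal_movie_format : Prop := ∀ (movie : String), Dom_movie_format movie → Spec_movie_format movie (movie_format movie)

-- ===== LEMMAS AND PROOFS =====

-- reference single-char splitter: split1 s l = l split on occurrences of s (never empty)
def split1 (s : Char) : List Char → List (List Char)
  | [] => [[]]
  | c :: r =>
    if c = s then [] :: split1 s r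
    else
      match split1 s r with
      | [] => [[c]]
      | w :: ws => (c :: w) :: ws

lemma split1_ne_nil (s : Char) (l : List Char) : split1 s l ≠ [] := by
  cases l with
  | nil => simp [split1]
  | cons c r =>
    simp only [split1]
    split_ifs
    · simp
    · cases h : split1 s r <;> simp

-- prepend to the head piece
def consHead (p : List Char) : List (List Char) → List (List Char)
  | [] => [p]
  | w :: ws => (p ++ w) :: ws

lemma consHead_consHead (a b : List Char) (ws : List (List Char)) :
    consHead a (consHead b ws) = consHead (a ++ b) ws := by
  cases ws <;> simp [consHead]

lemma split1_cons_ne (s c : Char) (r : List Char) (h : c ≠ s) :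
    split1 s (c :: r) = consHead [c] (split1 s r) := by
  simp only [split1, if_neg h]
  cases hr : split1 s r <;> simp [consHead]

-- PySem's fuel-based splitter coincides with split1 for a single-char separator
lemma go_eq_split1 (s : Char) (fuel : Nat) :
    ∀ (l cur : List Char) (acc : List (List Char)), l.length ≤ fuel →
      PySem.Chars.splitOn.go [s] fuel l cur acc =
        acc.reverse ++ consHead cur.reverse (split1 s l) := by
  induction fuel with
  | zero =>
    intro l cur acc hl
    have : l = [] := List.length_eq_zero_iff.mp (Nat.le_zero.mp hl)
    subst this
    simp [PySem.Chars.splitOn.go, split1, consHead]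
  | succ fuel ih =>
    intro l cur acc hl
    cases l with
    | nil => simp [PySem.Chars.splitOn.go, split1, consHead]
    | cons c rest =>
      simp only [PySem.Chars.splitOn.go]
      by_cases hc : c = s
      · subst hc
        have hpre : List.isPrefixOf [c] (c :: rest) = true := by
          simp [List.isPrefixOf]
        rw [if_pos hpre]
        have := ih rest [] ((cur.reverse) :: acc) (by simpa using Nat.le_of_succ_le_succ hl)
        simp only [List.length_cons, List.drop_succ_cons, List.length_nil, List.drop_zero] at this ⊢
        rw [this]
        simp [split1, consHead]
        cases hsp : split1 c rest with
        | nil => exact absurd hsp (split1_ne_nil c rest)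
        | cons w ws => simp
      · have hpre : List.isPrefixOf [s] (c :: rest) = false := by
          simp [List.isPrefixOf]; exact fun h => absurd h.symm hc
        rw [if_neg (by simp [hpre])]
        have := ih rest (c :: cur) acc (Nat.le_of_succ_le_succ hl)
        rw [this, split1_cons_ne s c rest hc, consHead_consHead]
        simp

lemma splitOn_eq_split1 (s : Char) (l : List Char) :
    PySem.Chars.splitOn l [s] = split1 s l := by
  have h := go_eq_split1 s (l.length + 1) l [] [] (Nat.le_succ _)
  simp only [PySem.Chars.splitOn] at *
  rw [h]
  cases hsp : split1 s l with
  | nil => exact absurd hsp (split1_ne_nil s l)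
  | cons w ws => simp [consHead]

-- joining the masked pieces with sep' rebuilds the single-pass map
lemma join_consHead (h : Char → Char) (sep' c : Char) (P : List (List Char)) (hP : P ≠ []) :
    PySem.Chars.join [sep'] ((consHead [c] P).map (List.map h)) =
      h c :: PySem.Chars.join [sep'] (P.map (List.map h)) := by
  cases P with
  | nil => exact absurd rfl hP
  | cons w ws =>
    cases ws with
    | nil => simp [consHead, PySem.Chars.join_singleton]
    | cons w' ws' =>
      simp only [consHead, List.map_cons, PySem.Chars.join_cons_cons]
      simp

lemma join_split1 (h : Char → Char) (sep' s : Char) (l : List Char) :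
    PySem.Chars.join [sep'] ((split1 s l).map (List.map h)) =
      l.map (fun c => if c = s then sep' else h c) := by
  induction l with
  | nil => simp [split1, PySem.Chars.join_singleton]
  | cons c r ihr =>
    by_cases hc : c = s
    · subst hc
      have hstep : split1 c (c :: r) = [] :: split1 c r := by simp [split1]
      rw [hstep]
      cases hsp : split1 c r with
      | nil => exact absurd hsp (split1_ne_nil c r)
      | cons w ws =>
        have hj : PySem.Chars.join [sep'] (List.map (List.map h) ([] :: w :: ws)) =
            sep' :: PySem.Chars.join [sep'] (List.map (List.map h) (w :: ws)) := by
          simp [PySem.Chars.join_cons_cons]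
        rw [hj, ← hsp, ihr]
        simp
    · rw [split1_cons_ne s c r hc,
        join_consHead h sep' c _ (by simpa using split1_ne_nil s r), ihr]
      simp [hc]

-- A's per-character branch equals B's masking off spaces
lemma branch_eq (c : Char) :
    (if c ∈ vowels then c else if c = ' ' then '/' else '_') =
      (if c = ' ' then '/' else if c ∈ bVowels then c else '_') := by
  by_cases hs : c = ' '
  · subst hs; decide
  · by_cases hv : c ∈ vowels
    · have : c ∈ bVowels := (PySem.Set.mem_ofList _ c).mpr hv
      simp [hv, hs, this]
    · have : c ∉ bVowels := fun h => hv ((PySem.Set.mem_ofList _ c).mp h)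
      simp [hv, hs, this]

lemma foldl_eq_map (g : Char → Char) (l : List Char) (acc : List Char) :
    l.foldl (fun a c => a ++ [g c]) acc = acc ++ l.map g := by
  induction l generalizing acc with
  | nil => simp
  | cons x xs ih => simp [List.foldl, ih]

lemma guess_eq (l : List Char) :
    l.foldl (fun acc c =>
      if c ∈ vowels then acc ++ [c]
      else if c = ' ' then acc ++ ['/']
      else acc ++ ['_']) [] =
    PySem.Chars.join ['/'] ((PySem.Chars.splitOn l [' ']).map maskWord) := by
  have hfun : (fun (acc : List Char) (c : Char) =>
      if c ∈ vowels then acc ++ [c]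
      else if c = ' ' then acc ++ ['/'] else acc ++ ['_']) =
      (fun a c => a ++ [if c ∈ vowels then c else if c = ' ' then '/' else '_']) := by
    funext a c; split_ifs <;> rfl
  rw [hfun, foldl_eq_map]
  have hmask : maskWord = List.map (fun c => if c ∈ bVowels then c else '_') := by
    funext w; simp [maskWord]
  rw [splitOn_eq_split1, hmask,
    join_split1 (fun c => if c ∈ bVowels then c else '_') '/' ' ' l]
  simp only [List.nil_append]
  exact List.map_congr_left fun c _ => branch_eq c

-- ===== VERDICT (by name: the statement is the Claim_ definition above) =====
theorem movie_format_spec : Claim_equal_movie_format := by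
  intro movie _
  show _ = _
  simp only [movie_format, movie_format_alt, guess_eq]
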